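-- pv_equiv track=rewrite | github.com/ghkdxodn84-oss/KORStockScan | src/trading/order/tick_utils.py | move_price_by_ticks
-- ===== SOURCE A (Python) =====
-- def get_tick_size(price: int | float) -> int:
--     """Return the Korean stock tick size for a price."""
--
--     p = int(price)
--     if p < 2_000:
--         return 1
--     if p < 5_000:
--         return 5
--     if p < 20_000:
--         return 10
--     if p < 50_000:
--         return 50
--     if p < 200_000:
--         return 100
--     if p < 500_000:
--         return 500
--     return 1_000
--
-- def clamp_price_to_tick(price: int | float) -> int:
--     """Clamp a raw price down to the nearest valid tick boundary."""
--
--     p = max(1, int(price))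
--     tick = get_tick_size(p)
--     return max(tick, (p // tick) * tick)
--
-- def move_price_by_ticks(price: int | float, ticks: int) -> int:
--     """Move a price by a signed number of Korean market ticks."""
--
--     moved = clamp_price_to_tick(price)
--     if ticks == 0:
--         return moved
--
--     step = 1 if ticks > 0 else -1
--     remaining = abs(ticks)
--     for _ in range(remaining):
--         if step > 0:
--             moved += get_tick_size(moved)
--             moved = clamp_price_to_tick(moved)
--         else:
--             previous = max(1, moved - 1)
--             moved = clamp_price_to_tick(previous)
--     return moved
-- ===== SOURCE B (Python) =====
-- # Closed-form band arithmetic: map the price grid to a flat tick index, add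
-- # ticks, map back (O(1) instead of O(|ticks|) stepping).
--
-- def _tick_index(p):
--     """Index of the clamped price on the grid of valid Korean tick prices."""
--     if p < 2000:
--         return p - 1
--     if p < 5000:
--         return 1999 + (p - 2000) // 5
--     if p < 20000:
--         return 2599 + (p - 5000) // 10
--     if p < 50000:
--         return 4099 + (p - 20000) // 50
--     if p < 200000:
--         return 4699 + (p - 50000) // 100
--     if p < 500000:
--         return 6199 + (p - 200000) // 500
--     return 6799 + (p - 500000) // 1000
--
-- def _price_at(j):
--     """Price at flat tick index j (inverse of _tick_index on the grid)."""
--     if j < 1999: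
--         return 1 + j
--     if j < 2599:
--         return 2000 + (j - 1999) * 5
--     if j < 4099:
--         return 5000 + (j - 2599) * 10
--     if j < 4699:
--         return 20000 + (j - 4099) * 50
--     if j < 6199:
--         return 50000 + (j - 4699) * 100
--     if j < 6799:
--         return 200000 + (j - 6199) * 500
--     return 500000 + (j - 6799) * 1000
--
-- def move_price_by_ticks(price, ticks):
--     p = max(1, int(price))
--     return _price_at(max(0, _tick_index(p) + ticks))
-- ===== Notes on version B (the rewrite author's own statement) =====
-- stated objective: faster
-- what changed: Replaces the tick-by-tick stepping loop with closed-form band arithmetic: the price is mapped to a flat tick index, the signed tick count is added (clamped at the bottom of the grid), and the index is mapped back to a price.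
import Mathlib
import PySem

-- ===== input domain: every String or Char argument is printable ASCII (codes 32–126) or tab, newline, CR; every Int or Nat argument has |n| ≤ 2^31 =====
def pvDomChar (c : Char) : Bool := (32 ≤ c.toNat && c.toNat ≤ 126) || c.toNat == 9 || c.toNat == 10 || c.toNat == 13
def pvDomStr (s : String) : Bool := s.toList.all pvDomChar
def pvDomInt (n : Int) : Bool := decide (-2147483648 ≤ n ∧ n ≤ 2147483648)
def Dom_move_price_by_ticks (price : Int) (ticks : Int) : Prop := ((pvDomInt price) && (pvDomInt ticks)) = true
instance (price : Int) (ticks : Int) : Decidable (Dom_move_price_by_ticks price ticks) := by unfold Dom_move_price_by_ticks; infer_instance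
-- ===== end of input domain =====

-- B replaces A's tick-by-tick stepping loop with closed-form band arithmetic
-- (flat tick index + ticks, mapped back); objective: faster.

-- ===== PORT A =====
def get_tick_size (price : Int) : Int :=
  let p := price
  if p < 2000 then 1
  else if p < 5000 then 5
  else if p < 20000 then 10
  else if p < 50000 then 50
  else if p < 200000 then 100
  else if p < 500000 then 500
  else 1000

def clamp_price_to_tick (price : Int) : Int :=
  let p := max 1 price
  let tick := get_tick_size p
  max tick (PySem.Int.floordiv p tick * tick)

def mpTicksLoop (step : Int) : Nat → Int → Int
  | 0, moved => moved
  | n + 1, moved =>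
      mpTicksLoop step n
        (if step > 0 then clamp_price_to_tick (moved + get_tick_size moved)
         else clamp_price_to_tick (max 1 (moved - 1)))

def move_price_by_ticks (price : Int) (ticks : Int) : Int :=
  let moved := clamp_price_to_tick price
  if ticks = 0 then moved
  else
    let step : Int := if ticks > 0 then 1 else -1
    mpTicksLoop step ticks.natAbs moved

-- ===== PORT B =====
def tickIndex (p : Int) : Int :=
  if p < 2000 then p - 1
  else if p < 5000 then 1999 + PySem.Int.floordiv (p - 2000) 5
  else if p < 20000 then 2599 + PySem.Int.floordiv (p - 5000) 10
  else if p < 50000 then 4099 + PySem.Int.floordiv (p - 20000) 50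
  else if p < 200000 then 4699 + PySem.Int.floordiv (p - 50000) 100
  else if p < 500000 then 6199 + PySem.Int.floordiv (p - 200000) 500
  else 6799 + PySem.Int.floordiv (p - 500000) 1000

def priceAt (j : Int) : Int :=
  if j < 1999 then 1 + j
  else if j < 2599 then 2000 + (j - 1999) * 5
  else if j < 4099 then 5000 + (j - 2599) * 10
  else if j < 4699 then 20000 + (j - 4099) * 50
  else if j < 6199 then 50000 + (j - 4699) * 100
  else if j < 6799 then 200000 + (j - 6199) * 500
  else 500000 + (j - 6799) * 1000

def move_price_by_ticks_alt (price : Int) (ticks : Int) : Int :=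
  let p := max 1 price
  priceAt (max 0 (tickIndex p + ticks))

-- ===== PRECONDITION & SPEC =====
def Spec_move_price_by_ticks (price : Int) (ticks : Int) (out : Int) : Prop := out = move_price_by_ticks_alt price ticks
instance (price : Int) (ticks : Int) (out : Int) : Decidable (Spec_move_price_by_ticks price ticks out) := by unfold Spec_move_price_by_ticks; infer_instance

-- ===== CLAIM (what is proved, stated in full; the proofs are below) =====
def Claim_equal_move_price_by_ticks : Prop := ∀ (price : Int) (ticks : Int), Dom_move_price_by_ticks price ticks → Spec_move_price_by_ticks price ticks (move_price_by_ticks price ticks)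


-- ===== LEMMAS AND PROOFS =====

theorem fd1 (a : Int) : PySem.Int.floordiv a 1 = a / 1 := PySem.Int.floordiv_eq_ediv_of_pos (by norm_num)
theorem fd5 (a : Int) : PySem.Int.floordiv a 5 = a / 5 := PySem.Int.floordiv_eq_ediv_of_pos (by norm_num)
theorem fd10 (a : Int) : PySem.Int.floordiv a 10 = a / 10 := PySem.Int.floordiv_eq_ediv_of_pos (by norm_num)
theorem fd50 (a : Int) : PySem.Int.floordiv a 50 = a / 50 := PySem.Int.floordiv_eq_ediv_of_pos (by norm_num)
theorem fd100 (a : Int) : PySem.Int.floordiv a 100 = a / 100 := PySem.Int.floordiv_eq_ediv_of_pos (by norm_num)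
theorem fd500 (a : Int) : PySem.Int.floordiv a 500 = a / 500 := PySem.Int.floordiv_eq_ediv_of_pos (by norm_num)
theorem fd1000 (a : Int) : PySem.Int.floordiv a 1000 = a / 1000 := PySem.Int.floordiv_eq_ediv_of_pos (by norm_num)

-- priceAt band equations
theorem priceAt1 (j : Int) (h : j < 1999) : priceAt j = 1 + j := by
  unfold priceAt; rw [if_pos h]
theorem priceAt2 (j : Int) (h1 : ¬ j < 1999) (h2 : j < 2599) : priceAt j = 2000 + (j - 1999) * 5 := by
  unfold priceAt; rw [if_neg h1, if_pos h2]
theorem priceAt3 (j : Int) (h1 : ¬ j < 2599) (h2 : j < 4099) : priceAt j = 5000 + (j - 2599) * 10 := by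
  unfold priceAt; rw [if_neg (by omega), if_neg h1, if_pos h2]
theorem priceAt4 (j : Int) (h1 : ¬ j < 4099) (h2 : j < 4699) : priceAt j = 20000 + (j - 4099) * 50 := by
  unfold priceAt; rw [if_neg (by omega), if_neg (by omega), if_neg h1, if_pos h2]
theorem priceAt5 (j : Int) (h1 : ¬ j < 4699) (h2 : j < 6199) : priceAt j = 50000 + (j - 4699) * 100 := by
  unfold priceAt; rw [if_neg (by omega), if_neg (by omega), if_neg (by omega), if_neg h1, if_pos h2]
theorem priceAt6 (j : Int) (h1 : ¬ j < 6199) (h2 : j < 6799) : priceAt j = 200000 + (j - 6199) * 500 := by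
  unfold priceAt; rw [if_neg (by omega), if_neg (by omega), if_neg (by omega), if_neg (by omega), if_neg h1, if_pos h2]
theorem priceAt7 (j : Int) (h1 : ¬ j < 6799) : priceAt j = 500000 + (j - 6799) * 1000 := by
  unfold priceAt
  rw [if_neg (by omega), if_neg (by omega), if_neg (by omega), if_neg (by omega), if_neg (by omega), if_neg h1]

theorem priceAt_ge_one (j : Int) (hj : 0 ≤ j) : 1 ≤ priceAt j := by
  unfold priceAt; split_ifs <;> omega

-- get_tick_size band equations
theorem gts1 (p : Int) (h : p < 2000) : get_tick_size p = 1 := by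
  simp only [get_tick_size]; rw [if_pos h]
theorem gts2 (p : Int) (h1 : ¬ p < 2000) (h2 : p < 5000) : get_tick_size p = 5 := by
  simp only [get_tick_size]; rw [if_neg h1, if_pos h2]
theorem gts3 (p : Int) (h1 : ¬ p < 5000) (h2 : p < 20000) : get_tick_size p = 10 := by
  simp only [get_tick_size]; rw [if_neg (by omega), if_neg h1, if_pos h2]
theorem gts4 (p : Int) (h1 : ¬ p < 20000) (h2 : p < 50000) : get_tick_size p = 50 := by
  simp only [get_tick_size]; rw [if_neg (by omega), if_neg (by omega), if_neg h1, if_pos h2]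
theorem gts5 (p : Int) (h1 : ¬ p < 50000) (h2 : p < 200000) : get_tick_size p = 100 := by
  simp only [get_tick_size]; rw [if_neg (by omega), if_neg (by omega), if_neg (by omega), if_neg h1, if_pos h2]
theorem gts6 (p : Int) (h1 : ¬ p < 200000) (h2 : p < 500000) : get_tick_size p = 500 := by
  simp only [get_tick_size]
  rw [if_neg (by omega), if_neg (by omega), if_neg (by omega), if_neg (by omega), if_neg h1, if_pos h2]
theorem gts7 (p : Int) (h1 : ¬ p < 500000) : get_tick_size p = 1000 := by
  simp only [get_tick_size]
  rw [if_neg (by omega), if_neg (by omega), if_neg (by omega), if_neg (by omega), if_neg (by omega), if_neg h1]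

theorem tickIndex_nonneg (p : Int) (hp : 1 ≤ p) : 0 ≤ tickIndex p := by
  unfold tickIndex
  split_ifs <;> (try simp only [fd5, fd10, fd50, fd100, fd500, fd1000]) <;> omega

-- A's clamp is B's index round-trip.
theorem clamp_eq_priceAt (price : Int) :
    clamp_price_to_tick price = priceAt (tickIndex (max 1 price)) := by
  show max (get_tick_size (max 1 price))
      (PySem.Int.floordiv (max 1 price) (get_tick_size (max 1 price)) * get_tick_size (max 1 price))
      = priceAt (tickIndex (max 1 price))
  set p := max 1 price with hp
  have h1 : (1 : Int) ≤ p := le_max_left _ _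
  by_cases c1 : p < 2000
  · have ht : tickIndex p = p - 1 := by unfold tickIndex; rw [if_pos c1]
    rw [gts1 p c1, ht, priceAt1 _ (by omega), fd1]; omega
  · by_cases c2 : p < 5000
    · have ht : tickIndex p = 1999 + (p - 2000) / 5 := by
        unfold tickIndex; rw [if_neg c1, if_pos c2, fd5]
      rw [gts2 p c1 c2, ht, priceAt2 _ (by omega) (by omega), fd5]; omega
    · by_cases c3 : p < 20000
      · have ht : tickIndex p = 2599 + (p - 5000) / 10 := by
          unfold tickIndex; rw [if_neg c1, if_neg c2, if_pos c3, fd10]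
        rw [gts3 p c2 c3, ht, priceAt3 _ (by omega) (by omega), fd10]; omega
      · by_cases c4 : p < 50000
        · have ht : tickIndex p = 4099 + (p - 20000) / 50 := by
            unfold tickIndex; rw [if_neg c1, if_neg c2, if_neg c3, if_pos c4, fd50]
          rw [gts4 p c3 c4, ht, priceAt4 _ (by omega) (by omega), fd50]; omega
        · by_cases c5 : p < 200000
          · have ht : tickIndex p = 4699 + (p - 50000) / 100 := by
              unfold tickIndex; rw [if_neg c1, if_neg c2, if_neg c3, if_neg c4, if_pos c5, fd100]
            rw [gts5 p c4 c5, ht, priceAt5 _ (by omega) (by omega), fd100]; omega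
          · by_cases c6 : p < 500000
            · have ht : tickIndex p = 6199 + (p - 200000) / 500 := by
                unfold tickIndex; rw [if_neg c1, if_neg c2, if_neg c3, if_neg c4, if_neg c5, if_pos c6, fd500]
              rw [gts6 p c5 c6, ht, priceAt6 _ (by omega) (by omega), fd500]; omega
            · have ht : tickIndex p = 6799 + (p - 500000) / 1000 := by
                unfold tickIndex
                rw [if_neg c1, if_neg c2, if_neg c3, if_neg c4, if_neg c5, if_neg c6, fd1000]
              rw [gts7 p c6, ht, priceAt7 _ (by omega), fd1000]; omega

theorem gts_pos (p : Int) : 1 ≤ get_tick_size p := by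
  simp only [get_tick_size]; split_ifs <;> omega

-- one upward step at index level
theorem up_idx (j : Int) (hj : 0 ≤ j) :
    tickIndex (priceAt j + get_tick_size (priceAt j)) = j + 1 := by
  by_cases b1 : j < 1999
  · rw [priceAt1 j b1, gts1 _ (by omega)]
    unfold tickIndex
    split_ifs <;> (try simp only [fd5, fd10, fd50, fd100, fd500, fd1000]) <;> omega
  · by_cases b2 : j < 2599
    · rw [priceAt2 j b1 b2, gts2 _ (by omega) (by omega)]
      unfold tickIndex
      split_ifs <;> (try simp only [fd5, fd10, fd50, fd100, fd500, fd1000]) <;> omega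
    · by_cases b3 : j < 4099
      · rw [priceAt3 j b2 b3, gts3 _ (by omega) (by omega)]
        unfold tickIndex
        split_ifs <;> (try simp only [fd5, fd10, fd50, fd100, fd500, fd1000]) <;> omega
      · by_cases b4 : j < 4699
        · rw [priceAt4 j b3 b4, gts4 _ (by omega) (by omega)]
          unfold tickIndex
          split_ifs <;> (try simp only [fd5, fd10, fd50, fd100, fd500, fd1000]) <;> omega
        · by_cases b5 : j < 6199
          · rw [priceAt5 j b4 b5, gts5 _ (by omega) (by omega)]
            unfold tickIndex
            split_ifs <;> (try simp only [fd5, fd10, fd50, fd100, fd500, fd1000]) <;> omega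
          · by_cases b6 : j < 6799
            · rw [priceAt6 j b5 b6, gts6 _ (by omega) (by omega)]
              unfold tickIndex
              split_ifs <;> (try simp only [fd5, fd10, fd50, fd100, fd500, fd1000]) <;> omega
            · rw [priceAt7 j b6, gts7 _ (by omega)]
              unfold tickIndex
              split_ifs <;> (try simp only [fd5, fd10, fd50, fd100, fd500, fd1000]) <;> omega

theorem up_step (j : Int) (hj : 0 ≤ j) :
    clamp_price_to_tick (priceAt j + get_tick_size (priceAt j)) = priceAt (j + 1) := by
  rw [clamp_eq_priceAt]
  have h1 := priceAt_ge_one j hj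
  have h2 := gts_pos (priceAt j)
  rw [max_eq_right (by omega), up_idx j hj]

-- one downward step at index level
theorem down_idx (j : Int) (hj : 0 ≤ j) :
    tickIndex (max 1 (priceAt j - 1)) = max 0 (j - 1) := by
  by_cases b1 : j < 1999
  · rw [priceAt1 j b1]
    unfold tickIndex
    split_ifs <;> (try simp only [fd5, fd10, fd50, fd100, fd500, fd1000]) <;> omega
  · by_cases b2 : j < 2599
    · rw [priceAt2 j b1 b2]
      unfold tickIndex
      split_ifs <;> (try simp only [fd5, fd10, fd50, fd100, fd500, fd1000]) <;> omega
    · by_cases b3 : j < 4099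
      · rw [priceAt3 j b2 b3]
        unfold tickIndex
        split_ifs <;> (try simp only [fd5, fd10, fd50, fd100, fd500, fd1000]) <;> omega
      · by_cases b4 : j < 4699
        · rw [priceAt4 j b3 b4]
          unfold tickIndex
          split_ifs <;> (try simp only [fd5, fd10, fd50, fd100, fd500, fd1000]) <;> omega
        · by_cases b5 : j < 6199
          · rw [priceAt5 j b4 b5]
            unfold tickIndex
            split_ifs <;> (try simp only [fd5, fd10, fd50, fd100, fd500, fd1000]) <;> omega
          · by_cases b6 : j < 6799
            · rw [priceAt6 j b5 b6]
              unfold tickIndex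
              split_ifs <;> (try simp only [fd5, fd10, fd50, fd100, fd500, fd1000]) <;> omega
            · rw [priceAt7 j b6]
              unfold tickIndex
              split_ifs <;> (try simp only [fd5, fd10, fd50, fd100, fd500, fd1000]) <;> omega

theorem down_step (j : Int) (hj : 0 ≤ j) :
    clamp_price_to_tick (max 1 (priceAt j - 1)) = priceAt (max 0 (j - 1)) := by
  rw [clamp_eq_priceAt]
  have hmax : max 1 (max 1 (priceAt j - 1)) = max 1 (priceAt j - 1) := by omega
  rw [hmax, down_idx j hj]

theorem loop_up (n : Nat) : ∀ j : Int, 0 ≤ j →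
    mpTicksLoop 1 n (priceAt j) = priceAt (j + n) := by
  induction n with
  | zero => intro j hj; simp [mpTicksLoop]
  | succ n ih =>
      intro j hj
      simp only [mpTicksLoop, if_pos (show (1 : Int) > 0 by norm_num)]
      rw [up_step j hj, ih (j + 1) (by omega)]
      congr 1; push_cast; ring

theorem loop_down (n : Nat) : ∀ j : Int, 0 ≤ j →
    mpTicksLoop (-1) n (priceAt j) = priceAt (max 0 (j - n)) := by
  induction n with
  | zero => intro j hj; simp only [mpTicksLoop, Nat.cast_zero]; congr 1; omega
  | succ n ih =>
      intro j hj
      simp only [mpTicksLoop, if_neg (show ¬ (-1 : Int) > 0 by norm_num)]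
      rw [down_step j hj, ih (max 0 (j - 1)) (by omega)]
      congr 1; push_cast; omega

-- ===== VERDICT (by name: the statement is the Claim_ definition above) =====
theorem move_price_by_ticks_spec : Claim_equal_move_price_by_ticks := by
  intro price ticks _
  unfold Spec_move_price_by_ticks move_price_by_ticks move_price_by_ticks_alt
  have hi : 0 ≤ tickIndex (max 1 price) := tickIndex_nonneg _ (le_max_left _ _)
  by_cases h0 : ticks = 0
  · subst h0
    rw [if_pos rfl, clamp_eq_priceAt]
    congr 1; omega
  · rw [if_neg h0]
    by_cases hpos : ticks > 0
    · rw [if_pos hpos, clamp_eq_priceAt, loop_up _ _ hi]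
      congr 1; omega
    · rw [if_neg hpos, clamp_eq_priceAt, loop_down _ _ hi]
      congr 1; omega
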